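-- pv_equiv track=rewrite | github.com/progval/Limnoria | src/ircutils.py | joinModes
-- ===== SOURCE A (Python) =====
-- def joinModes(modes):
--     """[(mode, targetOrNone), ...] => args
--     Joins modes of the same form as returned by separateModes."""
--     args = []
--     modeChars = []
--     currentMode = '\x00'
--     for (mode, arg) in modes:
--         if arg is not None:
--             args.append(arg)
--         if not mode.startswith(currentMode):
--             currentMode = mode[0]
--             modeChars.append(mode[0])
--         modeChars.append(mode[1])
--     args.insert(0, ''.join(modeChars))
--     return args
-- ===== SOURCE B (Python) =====
-- def joinModes(modes):
--     """[(mode, targetOrNone), ...] => args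
--     Joins modes of the same form as returned by separateModes."""
--     chars = []
--     args = []
--     i = 0
--     n = len(modes)
--     while i < n:
--         sign = modes[i][0][0]
--         chars.append(sign)
--         while i < n and modes[i][0][0] == sign:
--             mode, arg = modes[i]
--             chars.append(mode[1])
--             if arg is not None:
--                 args.append(arg)
--             i += 1
--     return [''.join(chars)] + args
-- ===== Notes on version B (the rewrite author's own statement) =====
-- stated objective: alternative
-- what changed: Replaces A's running-sentinel currentMode comparison inside a single fold with an explicit two-level grouping scan (outer loop per run of same-sign modes emitting the sign once, inner loop consuming the run), building the joined mode string and args per group.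
import Mathlib
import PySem

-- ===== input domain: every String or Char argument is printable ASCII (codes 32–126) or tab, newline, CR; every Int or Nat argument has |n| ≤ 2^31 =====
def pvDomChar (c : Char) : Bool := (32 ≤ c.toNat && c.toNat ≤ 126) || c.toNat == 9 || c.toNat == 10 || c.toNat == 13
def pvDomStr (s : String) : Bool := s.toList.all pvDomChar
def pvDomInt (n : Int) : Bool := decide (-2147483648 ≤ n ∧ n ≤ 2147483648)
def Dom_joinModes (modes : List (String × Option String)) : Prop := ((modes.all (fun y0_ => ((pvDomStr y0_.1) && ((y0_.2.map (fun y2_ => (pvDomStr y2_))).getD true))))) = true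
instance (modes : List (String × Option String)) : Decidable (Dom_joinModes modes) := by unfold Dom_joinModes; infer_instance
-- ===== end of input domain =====

-- B replaces A's running-sentinel currentMode comparison with an explicit two-level grouping scan
-- (one pass over runs of same-sign modes); objective: alternative decomposition, same O(n) cost.
-- Pre_ excludes inputs where A raises IndexError (some mode string shorter than 2 characters).


-- ===== PORT A =====
-- literal transliteration of A's loop: state (args, modeChars, currentMode), currentMode seeded '\x00'.
-- mode[0] / mode[1] use headD/getD defaults, reached only where Python raises IndexError (outside Pre_).
def joinModesStep (st : List String × List Char × List Char) (p : String × Option String) :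
    List String × List Char × List Char :=
  let ml := p.1.toList
  let args := match p.2 with
    | some a => st.1 ++ [a]
    | none => st.1
  if ¬ (PySem.Chars.startswith ml st.2.2) then
    (args, (st.2.1 ++ [ml.headD '\x00']) ++ [ml.getD 1 '\x00'], [ml.headD '\x00'])
  else
    (args, st.2.1 ++ [ml.getD 1 '\x00'], st.2.2)

def joinModes (modes : List (String × Option String)) : List String :=
  let st := modes.foldl joinModesStep ([], [], ['\x00'])
  String.ofList st.2.1 :: st.1

-- ===== PORT B =====
-- transcription of Source B's nested while loops as recursion on the remaining list:
-- inner loop = altTakeRun (consumes the run of modes whose first char equals sign),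
-- outer loop = altGroups (emits the sign char once per run).
def altTakeRun (sign : Char) : List (String × Option String) → List Char × List String × List (String × Option String)
  | [] => ([], [], [])
  | (m, a) :: rest =>
    if m.toList.headD '\x00' = sign then
      let r := altTakeRun sign rest
      ((m.toList.getD 1 '\x00') :: r.1,
       (match a with | some x => x :: r.2.1 | none => r.2.1),
       r.2.2)
    else ([], [], (m, a) :: rest)

theorem altTakeRun_rem_le (sign : Char) (l : List (String × Option String)) :
    (altTakeRun sign l).2.2.length ≤ l.length := by
  induction l with
  | nil => simp [altTakeRun]
  | cons p rest ih =>
    obtain ⟨m, a⟩ := p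
    simp only [altTakeRun]
    split
    · simpa using Nat.le_succ_of_le ih
    · simp

def altGroups : List (String × Option String) → List Char × List String
  | [] => ([], [])
  | (m, a) :: rest =>
    let sign := m.toList.headD '\x00'
    let r := altTakeRun sign ((m, a) :: rest)
    let g := altGroups r.2.2
    (sign :: (r.1 ++ g.1), r.2.1 ++ g.2)
  termination_by l => l.length
  decreasing_by
    simp only [altTakeRun]
    exact Nat.lt_succ_of_le (altTakeRun_rem_le _ rest)

def joinModes_alt (modes : List (String × Option String)) : List String :=
  let g := altGroups modes
  String.ofList g.1 :: g.2

-- ===== PRECONDITION & SPEC =====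
-- Pre_ excludes exactly the inputs on which A raises IndexError: some mode string has fewer
-- than two characters (mode[1], or mode[0] on the empty string).
def Pre_joinModes (modes : List (String × Option String)) : Prop :=
  ∀ p ∈ modes, 2 ≤ p.1.toList.length
instance (modes : List (String × Option String)) : Decidable (Pre_joinModes modes) := by
  unfold Pre_joinModes; infer_instance

def pvWitness_joinModes : (List (String × Option String)) :=
  [("+o", some "nick"), ("+v", none), ("-b", some "x!*@*")]

def Spec_joinModes (modes : List (String × Option String)) (out : List String) : Prop := out = joinModes_alt modes
instance (modes : List (String × Option String)) (out : List String) : Decidable (Spec_joinModes modes out) := by unfold Spec_joinModes; infer_instance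

-- ===== CLAIM (what is proved, stated in full; the proofs are below) =====
def Claim_equal_joinModes : Prop := ∀ (modes : List (String × Option String)), Dom_joinModes modes → Pre_joinModes modes → Spec_joinModes modes (joinModes modes)

-- ===== LEMMAS AND PROOFS =====

-- the characters/args emitted by A's loop from current sign c, as a structural recursion
def goA (c : Char) : List (String × Option String) → List Char × List String
  | [] => ([], [])
  | (m, a) :: rest =>
    let h := m.toList.headD '\x00'
    let s := m.toList.getD 1 '\x00'
    if h = c then
      let r := goA c rest
      (s :: r.1, (match a with | some x => x :: r.2 | none => r.2))
    else
      let r := goA h rest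
      (h :: s :: r.1, (match a with | some x => x :: r.2 | none => r.2))

theorem startswith_singleton (ml : List Char) (c : Char) (h : 1 ≤ ml.length) :
    PySem.Chars.startswith ml [c] = (ml.headD '\x00' == c) := by
  cases ml with
  | nil => simp at h
  | cons x t =>
    simp only [PySem.Chars.startswith, List.isPrefixOf, Bool.and_true]
    exact Bool.beq_comm

-- A's fold appends exactly goA's output
theorem foldA_eq_goA (l : List (String × Option String)) :
    ∀ (args : List String) (mc : List Char) (c : Char),
    (∀ p ∈ l, 2 ≤ p.1.toList.length) →
    ∃ cur, l.foldl joinModesStep (args, mc, [c]) =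
      (args ++ (goA c l).2, mc ++ (goA c l).1, cur) := by
  induction l with
  | nil => intro args mc c _; exact ⟨[c], by simp [goA]⟩
  | cons p rest ih =>
    intro args mc c hpre
    obtain ⟨m, a⟩ := p
    have hm : 2 ≤ m.toList.length := hpre (m, a) (by simp)
    have hrest : ∀ q ∈ rest, 2 ≤ q.1.toList.length := fun q hq => hpre q (by simp [hq])
    have hsw : PySem.Chars.startswith m.toList [c] = (m.toList.headD '\x00' == c) :=
      startswith_singleton _ _ (by omega)
    simp only [List.foldl_cons, joinModesStep, hsw, goA]
    by_cases hc : m.toList.headD '\x00' = c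
    · simp only [hc, beq_self_eq_true, not_true, ite_false]
      have := ih (match a with | some x => args ++ [x] | none => args)
        (mc ++ [m.toList.getD 1 '\x00']) c hrest
      obtain ⟨cur, hcur⟩ := this
      refine ⟨cur, ?_⟩
      cases a <;> simp_all
    · have hc' : ¬ m.toList.head?.getD '\x00' = c := by
        simpa [List.headD_eq_head?_getD] using hc
      have hb : (m.toList.head?.getD '\x00' == c) = false := beq_eq_false_iff_ne.mpr hc'
      simp only [List.headD_eq_head?_getD, hb, Bool.false_eq_true, not_false_eq_true, ite_true]
      have := ih (match a with | some x => args ++ [x] | none => args)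
        ((mc ++ [m.toList.headD '\x00']) ++ [m.toList.getD 1 '\x00'])
        (m.toList.headD '\x00') hrest
      obtain ⟨cur, hcur⟩ := this
      refine ⟨cur, ?_⟩
      cases a <;> simp_all

-- goA equals B's group decomposition
theorem goA_eq_groups (l : List (String × Option String)) :
    ∀ c, goA c l =
      ((altTakeRun c l).1 ++ (altGroups (altTakeRun c l).2.2).1,
       (altTakeRun c l).2.1 ++ (altGroups (altTakeRun c l).2.2).2) := by
  induction l with
  | nil => intro c; simp [goA, altTakeRun, altGroups]
  | cons p rest ih =>
    intro c
    obtain ⟨m, a⟩ := p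
    by_cases hc : m.toList.headD '\x00' = c
    · simp only [goA, altTakeRun, hc, ite_true]
      rw [ih c]
      cases a <;> simp
    · simp only [goA, altTakeRun, hc, ite_false]
      rw [show altGroups ((m, a) :: rest) =
        (m.toList.headD '\x00' ::
          ((altTakeRun (m.toList.headD '\x00') ((m, a) :: rest)).1 ++
            (altGroups (altTakeRun (m.toList.headD '\x00') ((m, a) :: rest)).2.2).1),
         (altTakeRun (m.toList.headD '\x00') ((m, a) :: rest)).2.1 ++
           (altGroups (altTakeRun (m.toList.headD '\x00') ((m, a) :: rest)).2.2).2)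
        from by rw [altGroups]]
      simp only [altTakeRun]
      rw [ih (m.toList.headD '\x00')]
      cases a <;> simp

-- ===== VERDICT (by name: the statement is the Claim_ definition above) =====
theorem joinModes_spec : Claim_equal_joinModes := by
  intro modes hdom hpre
  unfold Spec_joinModes joinModes joinModes_alt
  obtain ⟨cur, hfold⟩ := foldA_eq_goA modes [] [] '\x00' hpre
  rw [hfold]
  -- under Dom the first character of the first mode is never '\x00', so the initial
  -- sentinel never matches and goA '\x00' starts a fresh group, i.e. equals altGroups
  have hgo := goA_eq_groups modes '\x00'
  have hrun : altTakeRun '\x00' modes = ([], [], modes) := by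
    cases modes with
    | nil => simp [altTakeRun]
    | cons p rest =>
      obtain ⟨m, a⟩ := p
      have hm : 2 ≤ m.toList.length := hpre (m, a) (by simp)
      have hd : pvDomStr m = true := by
        unfold Dom_joinModes at hdom
        simp [List.all_eq_true] at hdom
        exact hdom.1.1
      have hne : ¬ m.toList.head?.getD '\x00' = '\x00' := by
        cases hml : m.toList with
        | nil => simp [hml] at hm
        | cons x t =>
          have hall : (x :: t).all pvDomChar = true := by
            simpa [pvDomStr, hml] using hd
          have hx : pvDomChar x = true := by
            simp only [List.all_cons, Bool.and_eq_true] at hall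
            exact hall.1
          simp only [List.head?_cons, Option.getD_some]
          intro h0
          rw [h0] at hx
          simp [pvDomChar] at hx
      simp [altTakeRun, List.headD_eq_head?_getD, hne]
  rw [hgo, hrun]
  rfl
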